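-- pv_equiv track=rewrite | github.com/williamknd/xrp-bot | xrp_bot_bybit.py | count_streak
-- ===== SOURCE A (Python) =====
-- def count_streak(opens, closes):
--     streak = [0] * len(closes)
--     for i in range(1, len(closes)):
--         if closes[i] < opens[i]:
--             streak[i] = streak[i-1] - 1 if streak[i-1] < 0 else -1
--         elif closes[i] > opens[i]:
--             streak[i] = streak[i-1] + 1 if streak[i-1] > 0 else 1
--     return streak
-- ===== SOURCE B (Python) =====
-- def count_streak(opens, closes):
--     n = len(closes)
--     if n == 0:
--         return []
--     # classify each candle: index 0 is neutral by construction, others by close vs open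
--     signs = [0]
--     for i in range(1, n):
--         if closes[i] < opens[i]:
--             signs.append(-1)
--         elif closes[i] > opens[i]:
--             signs.append(1)
--         else:
--             signs.append(0)
--     # expand maximal runs of equal sign: a run of sign s becomes s, 2s, 3s, ...
--     out = []
--     i = 0
--     while i < n:
--         j = i + 1
--         while j < n and signs[j] == signs[i]:
--             j += 1
--         s = signs[i]
--         for k in range(1, j - i + 1):
--             out.append(s * k)
--         i = j
--     return out
-- ===== Notes on version B (the rewrite author's own statement) =====
-- stated objective: alternative
-- what changed: B first classifies each candle into a sign list (-1/0/+1, index 0 forced neutral) and then expands each maximal run of equal sign into s,2s,3s,..., instead of A's in-place array recurrence that inspects the sign of the previous streak value at every index.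
import Mathlib
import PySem

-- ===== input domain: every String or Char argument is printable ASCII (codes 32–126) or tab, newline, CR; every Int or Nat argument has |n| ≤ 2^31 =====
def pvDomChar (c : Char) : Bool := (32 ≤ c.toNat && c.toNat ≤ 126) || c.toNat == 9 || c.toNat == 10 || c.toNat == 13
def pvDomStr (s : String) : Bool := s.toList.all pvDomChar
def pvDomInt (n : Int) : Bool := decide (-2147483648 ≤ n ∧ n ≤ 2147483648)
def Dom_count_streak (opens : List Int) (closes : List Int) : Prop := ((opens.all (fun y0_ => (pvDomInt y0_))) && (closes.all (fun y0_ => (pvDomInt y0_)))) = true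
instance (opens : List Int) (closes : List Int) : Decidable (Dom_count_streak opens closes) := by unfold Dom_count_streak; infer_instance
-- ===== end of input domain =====

-- B classifies candles into a sign list and expands maximal runs of equal sign into s,2s,3s,…;
-- A keeps an in-place streak array driven by the sign of the previous entry. Objective: alternative decomposition.

-- ===== PORT A =====
def count_streak (opens : List Int) (closes : List Int) : List Int :=
  let streak : List Int := List.replicate closes.length 0
  (PySem.List.pyRange 1 closes.length 1).foldl (fun st i =>
    let c := PySem.List.pyGetD closes i 0   -- in range under Pre_
    let o := PySem.List.pyGetD opens i 0    -- in range under Pre_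
    if c < o then
      let p := PySem.List.pyGetD st (i - 1) 0
      PySem.List.pySetD st i (if p < 0 then p - 1 else -1)
    else if c > o then
      let p := PySem.List.pyGetD st (i - 1) 0
      PySem.List.pySetD st i (if p > 0 then p + 1 else 1)
    else st) streak

-- ===== PORT B =====
-- the two nested while loops of Source B: the inner while finds the end of the current run
def expandRuns : List Int → List Int
  | [] => []
  | s :: rest =>
    let run := rest.takeWhile (fun x => x == s)
    ((List.range (run.length + 1)).map (fun (j : Nat) => s * ((j : Int) + 1))) ++
      expandRuns (rest.dropWhile (fun x => x == s))
termination_by l => l.length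
decreasing_by
  have := List.length_dropWhile_le (fun x => x == s) rest
  simp only [List.length_cons]; omega

def count_streak_alt (opens : List Int) (closes : List Int) : List Int :=
  if closes.length = 0 then [] else
  let signs : List Int := (PySem.List.pyRange 1 closes.length 1).foldl (fun sg i =>
    let c := PySem.List.pyGetD closes i 0   -- in range under Pre_
    let o := PySem.List.pyGetD opens i 0    -- in range under Pre_
    sg ++ [if c < o then -1 else if c > o then 1 else 0]) [0]
  expandRuns signs

-- ===== PRECONDITION & SPEC =====
-- Pre_ excludes exactly the inputs where the Python A raises IndexError (opens shorter than a
-- closes list of length ≥ 2); the Python B raises there as well.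
def Pre_count_streak (opens : List Int) (closes : List Int) : Prop :=
  closes.length ≤ 1 ∨ closes.length ≤ opens.length
instance (opens : List Int) (closes : List Int) : Decidable (Pre_count_streak opens closes) := by
  unfold Pre_count_streak; infer_instance

def pvWitness_count_streak : List Int × List Int := ([1, 2, 3], [2, 1, 3])

def Spec_count_streak (opens : List Int) (closes : List Int) (out : List Int) : Prop := out = count_streak_alt opens closes
instance (opens : List Int) (closes : List Int) (out : List Int) : Decidable (Spec_count_streak opens closes out) := by unfold Spec_count_streak; infer_instance

-- ===== CLAIM (what is proved, stated in full; the proofs are below) =====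
def Claim_equal_count_streak : Prop := ∀ (opens : List Int) (closes : List Int), Dom_count_streak opens closes → Pre_count_streak opens closes → Spec_count_streak opens closes (count_streak opens closes)

-- ===== LEMMAS AND PROOFS =====

-- the streak-update of A as a function of the previous value and the candle's sign
def stepS (p s : Int) : Int :=
  if s < 0 then (if p < 0 then p - 1 else -1)
  else if 0 < s then (if 0 < p then p + 1 else 1)
  else 0

def go2 : Int → List Int → List Int
  | _, [] => []
  | p, s :: t => stepS p s :: go2 (stepS p s) t

def sgn3 (c o : Int) : Int := if c < o then -1 else if c > o then 1 else 0

def sigsTail (opens closes : List Int) : List Int :=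
  (PySem.List.pyRange 1 closes.length 1).map
    (fun i => sgn3 (PySem.List.pyGetD closes i 0) (PySem.List.pyGetD opens i 0))

-- --- generic helpers ---

theorem set_append_cons_cons (q : List Int) (p x : Int) (rest : List Int) (v : Int) :
    (q ++ p :: x :: rest).set (q.length + 1) v = q ++ p :: v :: rest := by
  induction q with
  | nil => simp
  | cons a t ih => simp [ih]

theorem pyGetD_append_len (q : List Int) (p : Int) (rest : List Int) :
    PySem.List.pyGetD (q ++ p :: rest) ((q.length : Int)) 0 = p := by
  simp [PySem.List.pyGetD_natCast, List.getD]

theorem mem_of_head?_some {α : Type} {l : List α} {a : α} (h : l.head? = some a) : a ∈ l := by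
  cases l with
  | nil => simp at h
  | cons x t => simp at h; subst h; exact List.mem_cons_self ..

theorem head?_dropWhile_false {α : Type} (pr : α → Bool) :
    ∀ (l : List α) (a : α), (l.dropWhile pr).head? = some a → pr a = false := by
  intro l
  induction l with
  | nil => intro a h; simp [List.dropWhile] at h
  | cons x t ih =>
    intro a h
    by_cases hx : pr x
    · exact ih a (by simpa [List.dropWhile, hx] using h)
    · simp [List.dropWhile, hx] at h; subst h; simpa using hx

-- --- stepS facts ---

theorem stepS_opp (p s : Int) (hs : s = -1 ∨ s = 0 ∨ s = 1)
    (h1 : 0 < s → p ≤ 0) (h2 : s < 0 → 0 ≤ p) : stepS p s = s := by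
  rcases hs with h | h | h <;> subst h <;> simp [stepS] <;> omega

theorem stepS_self (s k : Int) (hs : s = -1 ∨ s = 0 ∨ s = 1) (hk : 1 ≤ k) :
    stepS (s * k) s = s * (k + 1) := by
  rcases hs with h | h | h <;> subst h <;> simp [stepS] <;> omega

-- --- run expansion: go2 over a run of equal signs ---

theorem go2_run : ∀ (rest : List Int), (∀ x ∈ rest, x = -1 ∨ x = 0 ∨ x = 1) →
    ∀ (s k : Int), (s = -1 ∨ s = 0 ∨ s = 1) → 1 ≤ k →
    go2 (s * k) rest =
      (List.range ((rest.takeWhile (fun x => x == s)).length)).map (fun (j : Nat) => s * (k + 1 + (j : Int)))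
        ++ go2 (s * (k + ((rest.takeWhile (fun x => x == s)).length : Int)))
            (rest.dropWhile (fun x => x == s)) := by
  intro rest
  induction rest with
  | nil => intro _ s k _ _; simp [go2]
  | cons x t ih =>
    intro hok s k hs hk
    by_cases hx : x = s
    · subst hx
      have hstep : stepS (x * k) x = x * (k + 1) := stepS_self x k hs hk
      have iht := ih (fun y hy => hok y (List.mem_cons_of_mem _ hy)) x (k + 1) hs (by omega)
      simp only [List.takeWhile_cons, List.dropWhile_cons, BEq.rfl, if_pos, go2, hstep,
        List.length_cons, List.range_succ_eq_map, List.map_cons, List.map_map,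
        List.cons_append, List.cons.injEq]
      refine ⟨by push_cast; ring, ?_⟩
      rw [iht]
      congr 1
      · apply List.map_congr_left; intro j _; simp only [Function.comp_apply]; push_cast; ring
      · congr 1; push_cast; ring
    · have hxs : (x == s) = false := by simp [hx]
      simp [List.takeWhile_cons, List.dropWhile_cons, hxs, go2]

-- --- expandRuns equals go2 from any "opposed" previous value ---

theorem expand_eq_go2 : ∀ (m : Nat) (sg : List Int), sg.length ≤ m →
    (∀ x ∈ sg, x = -1 ∨ x = 0 ∨ x = 1) →
    ∀ p : Int, (∀ s, sg.head? = some s → ((0 < s → p ≤ 0) ∧ (s < 0 → 0 ≤ p))) →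
    go2 p sg = expandRuns sg := by
  intro m
  induction m with
  | zero => intro sg hlen _ p _; interval_cases h : sg.length; · simp at h; simp [h, go2, expandRuns]
  | succ m ih =>
    intro sg hlen hok p hopp
    match sg with
    | [] => simp [go2, expandRuns]
    | s :: rest =>
      have hs : s = -1 ∨ s = 0 ∨ s = 1 := hok s (List.mem_cons_self ..)
      have hps : stepS p s = s := stepS_opp p s hs (hopp s rfl).1 (hopp s rfl).2
      have hrok : ∀ x ∈ rest, x = -1 ∨ x = 0 ∨ x = 1 :=
        fun x hx => hok x (List.mem_cons_of_mem _ hx)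
      have hrun := go2_run rest hrok s 1 hs le_rfl
      have hL : (0 : Int) ≤ ((rest.takeWhile (fun x => x == s)).length : Int) := by positivity
      set L := (rest.takeWhile (fun x => x == s)).length with hLdef
      have htail : go2 (s * (1 + (L : Int))) (rest.dropWhile (fun x => x == s)) =
          expandRuns (rest.dropWhile (fun x => x == s)) := by
        apply ih
        · have := List.length_dropWhile_le (p := fun x => x == s) rest
          simp at hlen; omega
        · intro x hx
          exact hrok x ((List.dropWhile_sublist (fun x => x == s)).subset hx)
        · intro t ht
          have htf : (t == s) = false := head?_dropWhile_false _ rest t ht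
          have hts : t ≠ s := by simpa using htf
          have htr : t = -1 ∨ t = 0 ∨ t = 1 := by
            have : t ∈ rest := (List.dropWhile_sublist (fun x => x == s)).subset
              (mem_of_head?_some ht)
            exact hrok t this
          constructor
          · intro h0
            have : t = 1 := by omega
            rcases hs with h | h | h <;> subst h <;> simp_all <;> nlinarith
          · intro h0
            have : t = -1 := by omega
            rcases hs with h | h | h <;> subst h <;> simp_all <;> nlinarith
      have h1 : go2 s rest = (List.range L).map (fun (j : Nat) => s * (1 + 1 + (j : Int))) ++
          expandRuns (rest.dropWhile (fun x => x == s)) := by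
        have h2 := hrun
        rw [mul_one] at h2
        rw [h2, htail]
      rw [expandRuns]
      simp only [go2, hps, h1, ← hLdef, List.range_succ_eq_map, List.map_cons, List.map_map,
        List.cons_append, List.cons.injEq]
      refine ⟨by push_cast; ring, ?_⟩
      congr 1
      apply List.map_congr_left; intro j _; simp only [Function.comp_apply]; push_cast; ring


-- --- A's fold over the streak array, as go2 over the remaining signs ---

theorem foldA (opens closes : List Int) :
    ∀ (d : Nat) (q : List Int) (p : Int), (q.length + 1) + d = closes.length →
    (PySem.List.pyRange ((q.length : Int) + 1) closes.length 1).foldl (fun st i =>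
      let c := PySem.List.pyGetD closes i 0
      let o := PySem.List.pyGetD opens i 0
      if c < o then
        let p := PySem.List.pyGetD st (i - 1) 0
        PySem.List.pySetD st i (if p < 0 then p - 1 else -1)
      else if c > o then
        let p := PySem.List.pyGetD st (i - 1) 0
        PySem.List.pySetD st i (if p > 0 then p + 1 else 1)
      else st) (q ++ p :: List.replicate d 0)
    = q ++ p :: go2 p ((PySem.List.pyRange ((q.length : Int) + 1) closes.length 1).map
        (fun i => sgn3 (PySem.List.pyGetD closes i 0) (PySem.List.pyGetD opens i 0))) := by
  intro d
  induction d with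
  | zero =>
    intro q p hlen
    rw [PySem.List.pyRange_one_eq_nil (by push_cast; omega)]
    simp [go2]
  | succ d ih =>
    intro q p hlen
    have hlt : ((q.length : Int) + 1) < closes.length := by exact_mod_cast by omega
    rw [PySem.List.pyRange_one_cons hlt]
    have hprev : PySem.List.pyGetD (q ++ p :: (0 : Int) :: List.replicate d 0)
        ((q.length : Int) + 1 - 1) 0 = p := by
      rw [show (q.length : Int) + 1 - 1 = (q.length : Int) by ring]
      exact pyGetD_append_len _ _ _
    have hset : ∀ v : Int, PySem.List.pySetD (q ++ p :: (0 : Int) :: List.replicate d 0)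
        ((q.length : Int) + 1) v = (q ++ [p]) ++ v :: List.replicate d 0 := by
      intro v
      rw [show ((q.length : Int) + 1) = (((q.length + 1 : Nat)) : Int) by push_cast; ring,
        PySem.List.pySetD_natCast, set_append_cons_cons]
      simp
    have hcast : (((q ++ [p]).length : Int) + 1) = ((q.length : Int) + 1) + 1 := by
      simp
    set c := PySem.List.pyGetD closes ((q.length : Int) + 1) 0 with hc0
    set o := PySem.List.pyGetD opens ((q.length : Int) + 1) 0 with ho0
    rw [List.replicate_succ]
    by_cases hc : c < o
    · have hsg : sgn3 c o = -1 := by simp [sgn3, hc]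
      simp only [List.foldl_cons, List.map_cons, ← hc0, ← ho0, hc, if_true, hprev, hset, go2,
        hsg]
      have := ih (q ++ [p]) (if p < 0 then p - 1 else -1) (by simp; omega)
      rw [hcast] at this
      rw [this]
      simp [stepS]
    · by_cases ho : c > o
      · have hsg : sgn3 c o = 1 := by simp [sgn3, hc, ho]
        simp only [List.foldl_cons, List.map_cons, ← hc0, ← ho0, hc, if_false, ho, if_true,
          hprev, hset, go2, hsg]
        have := ih (q ++ [p]) (if p > 0 then p + 1 else 1) (by simp; omega)
        rw [hcast] at this
        rw [this]
        simp [stepS]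
      · have hsg : sgn3 c o = 0 := by simp [sgn3, hc, ho]
        simp only [List.foldl_cons, List.map_cons, ← hc0, ← ho0, hc, if_false, ho, go2, hsg]
        have := ih (q ++ [p]) 0 (by simp; omega)
        rw [hcast] at this
        rw [show q ++ p :: (0 : Int) :: List.replicate d 0
            = (q ++ [p]) ++ (0 : Int) :: List.replicate d 0 by simp]
        rw [this]
        simp [stepS]

-- --- the two ports against the shared sign list ---

theorem a_eq (opens closes : List Int) (h : closes ≠ []) :
    count_streak opens closes = 0 :: go2 0 (sigsTail opens closes) := by
  have hn : 1 ≤ closes.length := List.length_pos_of_ne_nil h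
  unfold count_streak sigsTail
  rw [show List.replicate closes.length (0 : Int)
      = ([] : List Int) ++ (0 : Int) :: List.replicate (closes.length - 1) 0 by
    cases closes with
    | nil => simp at h
    | cons a t => simp [List.replicate_succ]]
  have := foldA opens closes (closes.length - 1) [] 0 (by simp; omega)
  simpa using this

theorem alt_eq (opens closes : List Int) (h : closes ≠ []) :
    count_streak_alt opens closes = expandRuns (0 :: sigsTail opens closes) := by
  unfold count_streak_alt
  rw [if_neg (by simpa using h)]
  rw [PySem.List.foldl_append_singleton_eq_map]
  simp [sigsTail, sgn3]

theorem sigs_ok (opens closes : List Int) :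
    ∀ x ∈ (0 : Int) :: sigsTail opens closes, x = -1 ∨ x = 0 ∨ x = 1 := by
  intro x hx
  rcases List.mem_cons.mp hx with h | h
  · right; left; exact h
  · rcases List.mem_map.mp h with ⟨i, _, rfl⟩
    unfold sgn3; split_ifs <;> simp

theorem count_streak_spec : Claim_equal_count_streak := by
  intro opens closes _ _
  unfold Spec_count_streak
  cases closes with
  | nil =>
    simp [count_streak, count_streak_alt, PySem.List.pyRange_one_eq_nil]
  | cons a t =>
    rw [a_eq opens (a :: t) (by simp), alt_eq opens (a :: t) (by simp)]
    exact expand_eq_go2 ((0 :: sigsTail opens (a :: t)).length) _ le_rfl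
      (sigs_ok opens (a :: t)) 0
      (by intro s hs; simp at hs; subst hs; exact ⟨fun h => by omega, fun h => by omega⟩)
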